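-- pv_equiv track=rewrite | github.com/fontes-mrc/advent-of-code | 2023/day5/main.py | get_maps
-- ===== SOURCE A (Python) =====
-- def get_maps(input_: list[str]) -> dict[int, dict[tuple[int, int], int]]:
--     maps: dict[int, dict[tuple[int, int], int]] = {}
--     map_: dict[tuple[int, int], int] = {}
--
--     i = 0
--     for row in input_[3:]:
--         if row == "":
--             continue
--
--         elif row.endswith(":"):
--             maps[i] = map_
--             map_ = {}
--             i += 1
--
--         else:
--             dest, source, size = tuple([int(n) for n in row.split(" ")])
--             map_[(source, source + size)] = dest - source
--
--     maps[i] = map_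
--     return maps
-- ===== SOURCE B (Python) =====
-- def get_maps(input_: list[str]) -> dict[int, dict[tuple[int, int], int]]:
--     rows = input_[3:]
--     headers = [j for j, row in enumerate(rows) if row.endswith(":")]
--     starts = [0] + [j + 1 for j in headers]
--     ends = headers + [len(rows)]
--     segments = [rows[a:b] for a, b in zip(starts, ends)]
--
--     def build(seg: list[str]) -> dict[tuple[int, int], int]:
--         map_: dict[tuple[int, int], int] = {}
--         for row in seg:
--             if row != "":
--                 dest, source, size = tuple([int(n) for n in row.split(" ")])
--                 map_[(source, source + size)] = dest - source
--         return map_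
--
--     return {i: build(seg) for i, seg in enumerate(segments)}
-- ===== Notes on version B (the rewrite author's own statement) =====
-- stated objective: alternative
-- what changed: A's single fused pass with a running counter and deferred dict store is re-decomposed into three phases: collect the indices of ':'-header lines, slice the input into segments at those boundaries, then build each segment's range dict independently and key the results 0..n by enumeration.
import Mathlib
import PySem

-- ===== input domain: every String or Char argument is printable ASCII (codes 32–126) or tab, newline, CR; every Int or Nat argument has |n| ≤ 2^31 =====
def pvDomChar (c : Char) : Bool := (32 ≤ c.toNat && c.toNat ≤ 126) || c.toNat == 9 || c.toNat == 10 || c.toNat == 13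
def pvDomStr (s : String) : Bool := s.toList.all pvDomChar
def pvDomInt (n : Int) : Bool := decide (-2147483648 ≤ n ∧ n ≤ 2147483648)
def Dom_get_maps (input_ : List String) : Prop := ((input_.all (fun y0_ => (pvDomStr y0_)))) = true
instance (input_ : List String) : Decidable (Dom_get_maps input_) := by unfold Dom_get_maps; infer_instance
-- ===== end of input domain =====

-- B re-decomposes A's single fused pass into header-index collection, boundary slices and a per-segment dict build (objective: alternative decomposition, same cost).

-- shared row parser: tuple([int(n) for n in row.split(" ")]) unpacked into three ints; none = the ValueError cases (excluded by Pre_)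
def pvParse3 (row : String) : Option (Int × Int × Int) :=
  match PySem.Str.split? row " " with
  | none => none
  | some toks =>
    match toks.mapM PySem.Int.ofStr? with
    | some [d, s, z] => some (d, s, z)
    | _ => none

-- flatten dict[tuple[int,int], int] items into the convention's Int × Int × Int triples
def pvFlatMD (m : PySem.Dict (Int × Int) Int) : List (Int × Int × Int) :=
  m.items.map (fun p => (p.1.1, p.1.2, p.2))

-- ===== PORT A =====
def get_maps (input_ : List String) : List (Int × List (Int × Int × Int)) :=
  let rows := PySem.List.slice input_ (some 3) none
  let st := rows.foldl
    (fun (st : PySem.Dict Int (PySem.Dict (Int × Int) Int) × PySem.Dict (Int × Int) Int × Int) row =>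
      if row = "" then st
      else if PySem.Str.endswith row ":" then (st.1.insert st.2.2 st.2.1, PySem.Dict.empty, st.2.2 + 1)
      else match pvParse3 row with
        | some (d, s, z) => (st.1, st.2.1.insert (s, s + z) (d - s), st.2.2)
        | none => st)     -- Python raises ValueError here; such inputs are outside Pre_
    (PySem.Dict.empty, PySem.Dict.empty, 0)
  ((st.1.insert st.2.2 st.2.1).items).map (fun p => (p.1, pvFlatMD p.2))

-- ===== PORT B =====
-- one data row of a segment folded into the segment's dict (Source B's build-loop body)
def pvStepRow (m : PySem.Dict (Int × Int) Int) (row : String) : PySem.Dict (Int × Int) Int :=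
  if row = "" then m
  else match pvParse3 row with
    | some (d, s, z) => m.insert (s, s + z) (d - s)
    | none => m       -- Python raises ValueError here; such inputs are outside Pre_

def get_maps_alt (input_ : List String) : List (Int × List (Int × Int × Int)) :=
  let rows := PySem.List.slice input_ (some 3) none
  let headers := ((PySem.List.enumerate rows 0).filter (fun p => PySem.Str.endswith p.2 ":")).map (fun p => p.1)
  let starts := [(0 : Int)] ++ headers.map (fun j => j + 1)
  let ends := headers ++ [PySem.List.len rows]
  let segments := (starts.zip ends).map (fun p => PySem.List.slice rows (some p.1) (some p.2))
  -- the final dict comprehension has the distinct keys 0..len(segments)-1, so its items are this list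
  (PySem.List.enumerate segments 0).map
    (fun p => (p.1, pvFlatMD (p.2.foldl pvStepRow PySem.Dict.empty)))

-- ===== PRECONDITION & SPEC =====
-- Pre_ excludes inputs where A raises ValueError: a row after the first three that is neither empty
-- nor a ':'-header and does not split on single spaces into exactly three int()-parsable tokens.
def Pre_get_maps (input_ : List String) : Prop :=
  ∀ row ∈ input_.drop 3,
    row = "" ∨ PySem.Str.endswith row ":" = true ∨ (pvParse3 row).isSome = true
instance (input_ : List String) : Decidable (Pre_get_maps input_) := by unfold Pre_get_maps; infer_instance

def pvWitness_get_maps : List String :=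
  ["seeds: 1 2", "", "junk", "seed-to-soil map:", "", "soil-to-fertilizer map:", ""]

def Spec_get_maps (input_ : List String) (out : List (Int × List (Int × Int × Int))) : Prop := out = get_maps_alt input_
instance (input_ : List String) (out : List (Int × List (Int × Int × Int))) : Decidable (Spec_get_maps input_ out) := by unfold Spec_get_maps; infer_instance

-- ===== CLAIM (what is proved, stated in full; the proofs are below) =====
def Claim_equal_get_maps : Prop := ∀ (input_ : List String), Dom_get_maps input_ → Pre_get_maps input_ → Spec_get_maps input_ (get_maps input_)

-- ===== LEMMAS AND PROOFS =====

-- the reference segmentation both ports are reduced to: rows split at ':'-headers (headers dropped)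
def pvSegs : List String → List (List String)
  | [] => [[]]
  | r :: rs =>
    if PySem.Str.endswith r ":" then [] :: pvSegs rs
    else match pvSegs rs with
      | s :: ss => (r :: s) :: ss
      | [] => [[r]]

lemma pvSegs_ne_nil (rows : List String) : pvSegs rows ≠ [] := by
  cases rows with
  | nil => simp [pvSegs]
  | cons r rs =>
    simp only [pvSegs]
    split
    · simp
    · cases h : pvSegs rs <;> simp

-- A's loop body, verbatim (for stating the loop invariant)
def pvStepA (st : PySem.Dict Int (PySem.Dict (Int × Int) Int) × PySem.Dict (Int × Int) Int × Int)
    (row : String) : PySem.Dict Int (PySem.Dict (Int × Int) Int) × PySem.Dict (Int × Int) Int × Int :=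
  if row = "" then st
  else if PySem.Str.endswith row ":" then (st.1.insert st.2.2 st.2.1, PySem.Dict.empty, st.2.2 + 1)
  else match pvParse3 row with
    | some (d, s, z) => (st.1, st.2.1.insert (s, s + z) (d - s), st.2.2)
    | none => st

-- the per-segment dicts A's pass produces: the first segment continues from m, the rest start empty
def pvBuilds (m : PySem.Dict (Int × Int) Int) : List (List String) → List (PySem.Dict (Int × Int) Int)
  | [] => []
  | s :: ss => s.foldl pvStepRow m :: ss.map (fun s => s.foldl pvStepRow PySem.Dict.empty)

-- B's intermediate values, named (definitionally what get_maps_alt computes)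
def pvHeaders (rows : List String) : List Int :=
  ((PySem.List.enumerate rows 0).filter (fun p => PySem.Str.endswith p.2 ":")).map (fun p => p.1)

def pvSegments (rows : List String) : List (List String) :=
  (([(0 : Int)] ++ (pvHeaders rows).map (fun j => j + 1)).zip ((pvHeaders rows) ++ [PySem.List.len rows])).map
    (fun (p : Int × Int) => PySem.List.slice rows (some p.1) (some p.2))

lemma get_maps_eq (input_ : List String) :
    get_maps input_ =
      (((PySem.List.slice input_ (some 3) none).foldl pvStepA (PySem.Dict.empty, PySem.Dict.empty, 0)).1.insert
          ((PySem.List.slice input_ (some 3) none).foldl pvStepA (PySem.Dict.empty, PySem.Dict.empty, 0)).2.2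
          ((PySem.List.slice input_ (some 3) none).foldl pvStepA (PySem.Dict.empty, PySem.Dict.empty, 0)).2.1).items.map
        (fun p => (p.1, pvFlatMD p.2)) := rfl

lemma get_maps_alt_eq (input_ : List String) :
    get_maps_alt input_ =
      (PySem.List.enumerate (pvSegments (PySem.List.slice input_ (some 3) none)) 0).map
        (fun p => (p.1, pvFlatMD (p.2.foldl pvStepRow PySem.Dict.empty))) := rfl

lemma pvBuilds_empty (l : List (List String)) :
    pvBuilds PySem.Dict.empty l = l.map (fun s => s.foldl pvStepRow PySem.Dict.empty) := by
  cases l <;> simp [pvBuilds]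

lemma pvStepRow_empty (m : PySem.Dict (Int × Int) Int) : pvStepRow m "" = m := by
  simp [pvStepRow]

-- A's loop, characterised: it appends one (index, dict) item per segment
lemma pvA_loop (rows : List String) (maps : PySem.Dict Int (PySem.Dict (Int × Int) Int))
    (m : PySem.Dict (Int × Int) Int) (i : Int)
    (hk : ∀ k, maps.contains k = true → k < i) :
    ((rows.foldl pvStepA (maps, m, i)).1.insert (rows.foldl pvStepA (maps, m, i)).2.2
        (rows.foldl pvStepA (maps, m, i)).2.1).items
    = maps.items ++ PySem.List.enumerate (pvBuilds m (pvSegs rows)) i := by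
  induction rows generalizing maps m i with
  | nil =>
    have hci : maps.contains i = false := by
      cases hc : maps.contains i with
      | false => rfl
      | true => exact absurd (hk i hc) (lt_irrefl i)
    simp [pvSegs, pvBuilds, PySem.List.enumerate_cons, PySem.List.enumerate_nil,
      PySem.Dict.items_insert_of_not_contains _ _ hci]
  | cons r rs ih =>
    simp only [List.foldl_cons]
    by_cases hre : r = ""
    · subst hre
      have hstep : pvStepA (maps, m, i) "" = (maps, m, i) := by simp [pvStepA]
      rw [hstep, ih maps m i hk]
      rcases hseg : pvSegs rs with _ | ⟨s, ss⟩
      · exact absurd hseg (pvSegs_ne_nil rs)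
      · have hne : PySem.Chars.endswith ([] : List Char) [':'] = false := by decide
        have hs : pvSegs ("" :: rs) = ("" :: s) :: ss := by simp [pvSegs, hseg, hne]
        rw [hs]
        simp [pvBuilds, pvStepRow_empty]
    · by_cases hcol : PySem.Str.endswith r ":" = true
      · have hcol' : PySem.Chars.endswith r.toList [':'] = true := by simpa using hcol
        have hstep : pvStepA (maps, m, i) r = (maps.insert i m, PySem.Dict.empty, i + 1) := by
          simp [pvStepA, hre, hcol']
        have hci : maps.contains i = false := by
          cases hc : maps.contains i with
          | false => rfl
          | true => exact absurd (hk i hc) (lt_irrefl i)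
        have hk' : ∀ k, (maps.insert i m).contains k = true → k < i + 1 := by
          intro k hkc
          rw [PySem.Dict.contains_insert] at hkc
          rcases Bool.or_eq_true_iff.mp hkc with h | h
          · have : k = i := by simpa using h
            omega
          · exact lt_trans (hk k h) (by omega)
        rw [hstep, ih (maps.insert i m) PySem.Dict.empty (i + 1) hk']
        have hsegc : pvSegs (r :: rs) = [] :: pvSegs rs := by simp [pvSegs, hcol']
        rw [hsegc, PySem.Dict.items_insert_of_not_contains _ _ hci, pvBuilds_empty]
        simp [pvBuilds, PySem.List.enumerate_cons]
      · have hcol' : PySem.Chars.endswith r.toList [':'] = false := by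
          rw [Bool.eq_false_iff]
          intro h
          exact hcol (by simpa using h)
        have hstep : pvStepA (maps, m, i) r = (maps, pvStepRow m r, i) := by
          simp only [pvStepA, pvStepRow, if_neg hre]
          rw [if_neg (by simp [hcol'])]
          rcases pvParse3 r with _ | ⟨d, s, z⟩ <;> rfl
        rw [hstep, ih maps (pvStepRow m r) i hk]
        rcases hseg : pvSegs rs with _ | ⟨s, ss⟩
        · exact absurd hseg (pvSegs_ne_nil rs)
        · have : pvSegs (r :: rs) = (r :: s) :: ss := by
            simp [pvSegs, hseg, hcol']
          rw [this]
          simp [pvBuilds]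

lemma pvEnumerate_map {α β : Type} (l : List α) (f : α → β) (s : Int) :
    PySem.List.enumerate (l.map f) s = (PySem.List.enumerate l s).map (fun p => (p.1, f p.2)) := by
  induction l generalizing s with
  | nil => simp [PySem.List.enumerate_nil]
  | cons x xs ih => simp [PySem.List.enumerate_cons, ih]

lemma pvHeaders_nonneg (rows : List String) : ∀ x ∈ pvHeaders rows, 0 ≤ x := by
  intro x hx
  simp only [pvHeaders, List.mem_map, List.mem_filter] at hx
  obtain ⟨p, ⟨hp, _⟩, rfl⟩ := hx
  rw [PySem.List.mem_enumerate_iff] at hp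
  obtain ⟨k, _, rfl⟩ := hp
  simp

lemma pvEnumFilterMap_shift {α : Type} (g : α → Bool) (rs : List α) (s : Int) :
    ((PySem.List.enumerate rs (s + 1)).filter (fun p => g p.2)).map (fun p => p.1)
    = (((PySem.List.enumerate rs s).filter (fun p => g p.2)).map (fun p => p.1)).map (fun j => j + 1) := by
  induction rs generalizing s with
  | nil => simp [PySem.List.enumerate_nil]
  | cons x xs ih =>
    simp only [PySem.List.enumerate_cons, List.filter_cons]
    cases g x <;> simp [ih (s + 1)]

lemma pvHeaders_cons (r : String) (rs : List String) :
    pvHeaders (r :: rs) =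
      if PySem.Str.endswith r ":" then 0 :: (pvHeaders rs).map (fun j => j + 1)
      else (pvHeaders rs).map (fun j => j + 1) := by
  have hsh := pvEnumFilterMap_shift (fun t => PySem.Str.endswith t ":") rs 0
  norm_num at hsh
  rw [show (":".toList : List Char) = [':'] from rfl] at hsh
  unfold pvHeaders
  rw [PySem.List.enumerate_cons, List.filter_cons]
  cases h : PySem.Str.endswith r ":" with
  | true => simp only [if_true]; simp; exact hsh
  | false => simp only [Bool.false_eq_true, if_false]; simp; exact hsh

lemma pvSlice_shift (r : String) (rs : List String) (a b : Int) (ha : 0 ≤ a) (hb : 0 ≤ b) :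
    PySem.List.slice (r :: rs) (some (a + 1)) (some (b + 1)) = PySem.List.slice rs (some a) (some b) := by
  rw [PySem.List.slice_toNat _ (by omega) (by omega), PySem.List.slice_toNat _ ha hb,
    Int.toNat_add ha (by norm_num), Int.toNat_add hb (by norm_num)]
  simp

lemma pvZipSlice_shift (r : String) (rs : List String) (l1 l2 : List Int)
    (h1 : ∀ x ∈ l1, 0 ≤ x) (h2 : ∀ x ∈ l2, 0 ≤ x) :
    ((l1.map (fun j => j + 1)).zip (l2.map (fun j => j + 1))).map
        (fun (p : Int × Int) => PySem.List.slice (r :: rs) (some p.1) (some p.2))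
    = (l1.zip l2).map (fun (p : Int × Int) => PySem.List.slice rs (some p.1) (some p.2)) := by
  rw [List.zip_map, List.map_map]
  apply List.map_congr_left
  intro p hp
  obtain ⟨a, b⟩ := p
  obtain ⟨ha, hb⟩ := List.of_mem_zip hp
  simpa [Prod.map] using pvSlice_shift r rs a b (h1 a ha) (h2 b hb)

lemma pvLen_cons (r : String) (rs : List String) :
    PySem.List.len (r :: rs) = PySem.List.len rs + 1 := by
  simp [PySem.List.len_eq]

lemma pvSlice_zero_len_succ (r : String) (rs : List String) :
    PySem.List.slice (r :: rs) (some 0) (some (PySem.List.len rs + 1)) =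
      r :: PySem.List.slice rs (some 0) (some (PySem.List.len rs)) := by
  have h0 : (0 : Int) ≤ 0 := le_refl 0
  have hL : (0 : Int) ≤ PySem.List.len rs := by simp [PySem.List.len_eq]
  rw [PySem.List.slice_toNat _ h0 (by omega), PySem.List.slice_toNat _ h0 hL]
  simp

lemma pvSlice_zero_succ (r : String) (rs : List String) (h : Int) (hh : 0 ≤ h) :
    PySem.List.slice (r :: rs) (some 0) (some (h + 1)) =
      r :: PySem.List.slice rs (some 0) (some h) := by
  rw [PySem.List.slice_toNat _ (le_refl 0) (by omega), PySem.List.slice_toNat _ (le_refl 0) hh]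
  have : (h + 1).toNat = h.toNat + 1 := Int.toNat_add hh (by norm_num)
  simp [this]

lemma pvSegments_eq (rows : List String) : pvSegments rows = pvSegs rows := by
  induction rows with
  | nil =>
    have h0 : PySem.List.slice ([] : List String) none (some 0) = [] := by
      rw [PySem.List.slice_to _ le_rfl]
      simp
    simp [pvSegments, pvHeaders, pvSegs, PySem.List.enumerate_nil, h0]
  | cons r rs ih =>
    have hnnH := pvHeaders_nonneg rs
    have hnnL : (0 : Int) ≤ PySem.List.len rs := by simp [PySem.List.len_eq]
    unfold pvSegments
    rw [pvHeaders_cons, pvLen_cons]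
    by_cases hcol : PySem.Str.endswith r ":" = true
    · have hch : PySem.Chars.endswith r.toList [':'] = true := by simpa using hcol
      rw [if_pos hcol]
      have hrw : pvSegs (r :: rs) = [] :: pvSegs rs := by simp [pvSegs, hch]
      rw [hrw, ← ih]
      have hs00 : PySem.List.slice (r :: rs) (some 0) (some 0) = [] := by
        rw [PySem.List.slice_toNat _ le_rfl le_rfl]; simp
      simp only [List.map_cons, List.cons_append, List.nil_append, List.zip_cons_cons]
      rw [show (((0 : Int) + 1) :: ((pvHeaders rs).map (fun j => j + 1)).map (fun j => j + 1))
            = ([0] ++ (pvHeaders rs).map (fun j => j + 1)).map (fun j => j + 1) by simp,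
          show ((pvHeaders rs).map (fun j => j + 1) ++ [PySem.List.len rs + 1])
            = (pvHeaders rs ++ [PySem.List.len rs]).map (fun j => j + 1) by simp,
          pvZipSlice_shift r rs _ _
            (by intro x hx; rcases List.mem_append.mp hx with h | h
                · simp at h; omega
                · obtain ⟨y, hy, rfl⟩ := List.mem_map.mp h
                  have := hnnH y hy; omega)
            (by intro x hx; rcases List.mem_append.mp hx with h | h
                · exact hnnH x h
                · simp at h; omega)]
      simp only [hs00]
      simp [pvSegments]
    · have hch : PySem.Chars.endswith r.toList [':'] = false := by
        rw [Bool.eq_false_iff]; intro h; exact hcol (by simpa using h)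
      rw [if_neg hcol]
      have hstep : ∀ s ss, pvSegs rs = s :: ss → pvSegs (r :: rs) = (r :: s) :: ss := by
        intro s ss hs; simp [pvSegs, hch, hs]
      rcases hH : pvHeaders rs with _ | ⟨h, t⟩
      · have hrs : pvSegs rs = [PySem.List.slice rs (some 0) (some (PySem.List.len rs))] := by
          rw [← ih]; simp [pvSegments, hH]
        rw [hstep _ _ hrs]
        simp only [List.map_nil, List.nil_append, List.append_nil,
          List.zip_cons_cons, List.zip_nil_right, List.map_cons]
        rw [pvSlice_zero_len_succ]
      · have hh : (0 : Int) ≤ h := hnnH h (by rw [hH]; exact List.mem_cons_self)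
        have hts : ∀ x ∈ t, (0 : Int) ≤ x := fun x hx => hnnH x (by rw [hH]; exact List.mem_cons_of_mem _ hx)
        have hrs : pvSegs rs = PySem.List.slice rs (some 0) (some h) ::
            (((h + 1) :: t.map (fun j => j + 1)).zip (t ++ [PySem.List.len rs])).map
              (fun (p : Int × Int) => PySem.List.slice rs (some p.1) (some p.2)) := by
          rw [← ih]; simp [pvSegments, hH]
        rw [hstep _ _ hrs]
        simp only [List.map_cons, List.cons_append, List.nil_append,
          List.zip_cons_cons]
        rw [show ((h + 1 + 1) :: (t.map (fun j => j + 1)).map (fun j => j + 1))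
              = ((h + 1) :: t.map (fun j => j + 1)).map (fun j => j + 1) by simp,
            show (t.map (fun j => j + 1) ++ [PySem.List.len rs + 1])
              = (t ++ [PySem.List.len rs]).map (fun j => j + 1) by simp,
            pvZipSlice_shift r rs _ _
              (by intro x hx; rcases List.mem_cons.mp hx with h' | h'
                  · omega
                  · obtain ⟨y, hy, rfl⟩ := List.mem_map.mp h'
                    have := hts y hy; omega)
              (by intro x hx; rcases List.mem_append.mp hx with h' | h'
                  · exact hts x h'
                  · simp at h'; omega)]
        rw [pvSlice_zero_succ r rs h hh]

theorem get_maps_spec : Claim_equal_get_maps := by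
  intro input_ _ _
  unfold Spec_get_maps
  rw [get_maps_eq, get_maps_alt_eq, pvSegments_eq,
    pvA_loop _ _ _ _ (by intro k hk; simp [PySem.Dict.contains_empty] at hk)]
  rw [pvBuilds_empty, pvEnumerate_map]
  simp [PySem.Dict.empty]
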